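-- pv_equiv track=rewrite | github.com/Carole-GRD/ESA-Python | ESA - Syllabus/losange_d_etoiles.py | dessiner_losange
-- ===== SOURCE A (Python) =====
-- def dessiner_losange(n):
--     """
--     Génère un losange sous forme de chaîne de caractères basé sur un nombre donné n.
--
--     :param n: (int) la moitié de la longueur de la diagonale formée par les étoiles
--                     (longueur maximale des lignes est 2 * n)
--     :return: (str) une chaîne représentant le losange avec des '*' et des espaces
--     """
--     losange = []  # Liste pour stocker les lignes du losange
--
--     # Partie supérieure du losange (y compris la ligne centrale)
--     for i in range(n):
--         spaces = ' ' * (n - i - 1)  # Calcul des espaces vides à gauche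
--         stars = '*' * (2 * (i + 1))  # Calcul du nombre d'étoiles
--         losange.append(spaces + stars)  # Ajouter la ligne à la liste
--
--     # Partie inférieure du losange
--     for i in range(n - 1, 0, -1):
--         spaces = ' ' * (n - i)  # Calcul des espaces vides à gauche
--         stars = '*' * (2 * i)  # Calcul du nombre d'étoiles
--         losange.append(spaces + stars)  # Ajouter la ligne à la liste
--
--     return '\n'.join(losange)  # Joindre toutes les lignes avec des sauts de ligne
-- ===== SOURCE B (Python) =====
-- def dessiner_losange(n):
--     lines = []
--     for r in range(2 * n - 1):
--         d = abs(r - (n - 1))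
--         lines.append(' ' * d + '*' * (2 * (n - d)))
--     return '\n'.join(lines)
-- ===== Notes on version B (the rewrite author's own statement) =====
-- stated objective: simpler
-- what changed: One symmetric pass over all 2*n-1 rows with a closed-form distance-to-center d = abs(r-(n-1)) per row replaces A's two directional loops with separate space/star formulas.
import Mathlib
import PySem

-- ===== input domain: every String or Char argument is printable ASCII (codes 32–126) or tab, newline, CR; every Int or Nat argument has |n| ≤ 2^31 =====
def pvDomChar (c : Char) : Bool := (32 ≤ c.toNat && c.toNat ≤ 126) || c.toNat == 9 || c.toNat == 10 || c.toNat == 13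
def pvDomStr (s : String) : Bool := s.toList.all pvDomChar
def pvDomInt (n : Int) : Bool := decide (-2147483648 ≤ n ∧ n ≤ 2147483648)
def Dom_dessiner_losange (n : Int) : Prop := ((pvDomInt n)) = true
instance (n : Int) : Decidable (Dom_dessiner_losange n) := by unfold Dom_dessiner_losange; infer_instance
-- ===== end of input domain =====

-- B replaces A's two directional loops by one symmetric pass over all 2*n-1 rows with the
-- closed-form distance d = |r-(n-1)| per row (objective: simpler).
-- Hand-ported string primitives (exact on this use): 'c' * k on a string is '"".pushn c k.toNat'
-- (Python's negative repeat count gives '', as does .toNat); '\n'.join(lines) is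
-- 'String.intercalate "\n" lines' (both return "" on [] and the plain concatenation otherwise).

-- 'c' * k  (Python string repetition; exact: negative k gives "")
def pvRepeatChar (c : Char) (k : Int) : String := "".pushn c k.toNat

-- ===== PORT A =====
def dessiner_losange (n : Int) : String :=
  -- top part, including the central line (Python's list.append is O(1) on a dynamic
  -- array, so the accumulator is an Array, read back as a List at the end)
  let losange : Array String := (PySem.List.pyRange 0 n 1).foldl (fun acc i =>
    let spaces := pvRepeatChar ' ' (n - i - 1)
    let stars := pvRepeatChar '*' (2 * (i + 1))
    acc.push (spaces ++ stars)) #[]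
  -- bottom part
  let losange := (PySem.List.pyRange (n - 1) 0 (-1)).foldl (fun acc i =>
    let spaces := pvRepeatChar ' ' (n - i)
    let stars := pvRepeatChar '*' (2 * i)
    acc.push (spaces ++ stars)) losange
  String.intercalate "\n" losange.toList

-- ===== PORT B =====
def dessiner_losange_alt (n : Int) : String :=
  String.intercalate "\n" ((PySem.List.pyRange 0 (2 * n - 1) 1).map (fun r =>
    let d := |r - (n - 1)|
    pvRepeatChar ' ' d ++ pvRepeatChar '*' (2 * (n - d))))

-- ===== PRECONDITION & SPEC =====
def Spec_dessiner_losange (n : Int) (out : String) : Prop := out = dessiner_losange_alt n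
instance (n : Int) (out : String) : Decidable (Spec_dessiner_losange n out) := by unfold Spec_dessiner_losange; infer_instance

-- ===== CLAIM (what is proved, stated in full; the proofs are below) =====
def Claim_equal_dessiner_losange : Prop := ∀ (n : Int), Dom_dessiner_losange n → Spec_dessiner_losange n (dessiner_losange n)

-- ===== LEMMAS AND PROOFS =====

-- an append-loop over an Array accumulator is a map
theorem foldl_push_toList {A B : Type} (l : List A) (f : A → B) (arr : Array B) :
    (l.foldl (fun acc x => acc.push (f x)) arr).toList = arr.toList ++ l.map f := by
  induction l generalizing arr with
  | nil => simp
  | cons x t ih => simp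

-- The list of lines both programs build is the same.
theorem dessiner_losange_lines_eq (n : Int) :
    ((PySem.List.pyRange 0 n 1).map (fun i =>
        pvRepeatChar ' ' (n - i - 1) ++ pvRepeatChar '*' (2 * (i + 1)))
     ++ (PySem.List.pyRange (n - 1) 0 (-1)).map (fun i =>
        pvRepeatChar ' ' (n - i) ++ pvRepeatChar '*' (2 * i)))
    = (PySem.List.pyRange 0 (2 * n - 1) 1).map (fun r =>
        pvRepeatChar ' ' |r - (n - 1)| ++ pvRepeatChar '*' (2 * (n - |r - (n - 1)|))) := by
  by_cases hn : n ≤ 0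
  · rw [PySem.List.pyRange_one_eq_nil hn, PySem.List.pyRange_neg_one_eq_nil (by omega),
      PySem.List.pyRange_one_eq_nil (by omega)]
    rfl
  · rw [not_le] at hn
    rw [PySem.List.pyRange_one_append 0 n (2 * n - 1) (le_of_lt hn) (by omega),
      List.map_append]
    congr 1
    · -- top half: rows 0..n-1, where d = n-1-r
      apply List.map_congr_left
      intro r hr
      rw [PySem.List.mem_pyRange_one] at hr
      have hd : |r - (n - 1)| = n - 1 - r := by
        rw [abs_of_nonpos (by omega)]; ring
      rw [hd]
      have h1 : n - r - 1 = n - 1 - r := by ring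
      have h2 : 2 * (r + 1) = 2 * (n - (n - 1 - r)) := by ring
      rw [h1, h2]
    · -- bottom half: A counts i = n-1 down to 1, B counts r = n up to 2n-2 with d = r-(n-1) = n-i
      rw [PySem.List.pyRange_neg_one, PySem.List.pyRange_one, List.map_map, List.map_map]
      have hlen : (n - 1 - 0).toNat = (2 * n - 1 - n).toNat := by omega
      rw [hlen]
      apply List.map_congr_left
      intro k hk
      rw [List.mem_range] at hk
      simp only [Function.comp]
      have hd : |(n + (k : Int)) - (n - 1)| = (k : Int) + 1 := by
        rw [abs_of_nonneg (by omega)]; ring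
      simp only [hd]
      have h1 : n - (n - 1 - (k : Int)) = (k : Int) + 1 := by ring
      have h2 : 2 * (n - 1 - (k : Int)) = 2 * (n - ((k : Int) + 1)) := by ring
      rw [h1, h2]

-- ===== VERDICT (by name: the statement is the Claim_ definition above) =====
theorem dessiner_losange_spec : Claim_equal_dessiner_losange := by
  intro n _
  unfold Spec_dessiner_losange dessiner_losange dessiner_losange_alt
  simp only []
  rw [foldl_push_toList, foldl_push_toList]
  simp only [List.nil_append]
  rw [dessiner_losange_lines_eq]
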